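-- pv_equiv track=rewrite | github.com/yijencheng/Leetcode | 20230523OA/2.py | solution
-- ===== SOURCE A (Python) =====
-- def solution(blocks):
--     ans = 0
--     # Implement your solution here
--     i=0
--     for i in range(len(blocks)):
--         h = blocks[i]
--         if (i<len(blocks)-1 and blocks[i+1]<h) or (i>=0 and blocks[i-1]<h):
--             continue
--         l,r = i,i
--         while l>0:
--             if blocks[l-1]< blocks[l]:
--                 break
--             l-=1
--         while r<len(blocks)-1:
--             if blocks[r+1]<blocks[r-1]:
--                 break
--             r+=1
--         ans = max(ans, r-l+1)
--     return ans
-- ===== SOURCE B (Python) =====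
-- def solution(blocks):
--     n = len(blocks)
--     # left[i]: leftmost endpoint of the expansion starting at i (memoized chain, one forward pass)
--     left = []
--     for i in range(n):
--         left.append(i if i == 0 or blocks[i - 1] < blocks[i] else left[i - 1])
--     # right[i]: rightmost endpoint of the expansion starting at i (memoized chain, one backward pass)
--     right = [0] * n
--     for i in range(n - 1, -1, -1):
--         right[i] = i if i == n - 1 or blocks[i + 1] < blocks[i - 1] else right[i + 1]
--     ans = 0
--     for i in range(n):
--         if (i < n - 1 and blocks[i + 1] < blocks[i]) or blocks[i - 1] < blocks[i]:
--             continue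
--         ans = max(ans, right[i] - left[i] + 1)
--     return ans
-- ===== Notes on version B (the rewrite author's own statement) =====
-- stated objective: faster
-- what changed: Replaces A's per-index while-loop expansions (rescanned for every qualifying index) with two memoized endpoint arrays (left chain in one forward pass, right chain in one backward pass) followed by a single max pass.
import Mathlib
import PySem

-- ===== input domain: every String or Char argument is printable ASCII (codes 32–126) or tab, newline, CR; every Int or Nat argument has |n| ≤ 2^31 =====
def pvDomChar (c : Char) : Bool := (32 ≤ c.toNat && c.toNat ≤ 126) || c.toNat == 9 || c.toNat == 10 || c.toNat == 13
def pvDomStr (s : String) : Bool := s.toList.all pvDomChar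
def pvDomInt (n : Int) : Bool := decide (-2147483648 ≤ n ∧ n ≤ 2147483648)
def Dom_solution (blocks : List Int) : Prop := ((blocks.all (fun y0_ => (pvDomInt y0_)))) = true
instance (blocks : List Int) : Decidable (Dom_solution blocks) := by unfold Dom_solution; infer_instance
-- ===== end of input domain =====

-- B replaces A's per-index while-loop rescans by two memoized endpoint arrays and one max pass (objective: faster).

-- ===== PORT A =====
-- while l>0: if blocks[l-1] < blocks[l]: break; l -= 1   (l stays ≥ 0, so a Nat)
def solWhileL (blocks : List Int) : Nat → Nat
  | 0 => 0
  | l + 1 =>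
    if PySem.List.pyGetD blocks (l : Int) 0 < PySem.List.pyGetD blocks ((l : Int) + 1) 0 then l + 1
    else solWhileL blocks l
-- while r<n-1: if blocks[r+1] < blocks[r-1]: break; r += 1   (fuel = n-1-r iterations remain)
def solWhileR (blocks : List Int) (r : Int) : Nat → Int
  | 0 => r
  | fuel + 1 =>
    if PySem.List.pyGetD blocks (r + 1) 0 < PySem.List.pyGetD blocks (r - 1) 0 then r
    else solWhileR blocks (r + 1) fuel

def solution (blocks : List Int) : Int :=
  let n : Int := blocks.length
  (PySem.List.pyRange 0 n 1).foldl (fun ans i =>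
    let h := PySem.List.pyGetD blocks i 0
    if (i < n - 1 ∧ PySem.List.pyGetD blocks (i + 1) 0 < h) ∨
       (0 ≤ i ∧ PySem.List.pyGetD blocks (i - 1) 0 < h) then ans
    else
      let l : Nat := solWhileL blocks i.toNat
      let r : Int := solWhileR blocks i (n - 1 - i).toNat
      max ans (r - (l : Int) + 1)) 0

-- ===== PORT B =====
-- for i in range(n): left.append(i if i == 0 or blocks[i-1] < blocks[i] else left[i-1])
def altLeft (blocks : List Int) : Nat → List Int
  | 0 => []
  | k + 1 =>
    let acc := altLeft blocks k
    acc ++ [if k = 0 ∨ PySem.List.pyGetD blocks ((k : Int) - 1) 0 < PySem.List.pyGetD blocks (k : Int) 0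
            then (k : Int) else PySem.List.pyGetD acc ((k : Int) - 1) 0]
-- for i in range(n-1,-1,-1): right[i] = i if i == n-1 or blocks[i+1] < blocks[i-1] else right[i+1]
-- built back-to-front: after k steps the list holds right[n-k..n-1]
def altRight (blocks : List Int) : Nat → List Int
  | 0 => []
  | k + 1 =>
    let acc := altRight blocks k
    let i : Int := (blocks.length : Int) - ((k : Int) + 1)
    (if i = (blocks.length : Int) - 1 ∨
        PySem.List.pyGetD blocks (i + 1) 0 < PySem.List.pyGetD blocks (i - 1) 0
     then i else PySem.List.pyGetD acc 0 0) :: acc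

def solution_alt (blocks : List Int) : Int :=
  let n : Int := blocks.length
  let left := altLeft blocks blocks.length
  let right := altRight blocks blocks.length
  (PySem.List.pyRange 0 n 1).foldl (fun ans i =>
    if (i < n - 1 ∧ PySem.List.pyGetD blocks (i + 1) 0 < PySem.List.pyGetD blocks i 0) ∨
       PySem.List.pyGetD blocks (i - 1) 0 < PySem.List.pyGetD blocks i 0 then ans
    else max ans (PySem.List.pyGetD right i 0 - PySem.List.pyGetD left i 0 + 1)) 0

-- ===== PRECONDITION & SPEC =====
def Spec_solution (blocks : List Int) (out : Int) : Prop := out = solution_alt blocks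
instance (blocks : List Int) (out : Int) : Decidable (Spec_solution blocks out) := by unfold Spec_solution; infer_instance

-- ===== CLAIM (what is proved, stated in full; the proofs are below) =====
def Claim_equal_solution : Prop := ∀ (blocks : List Int), Dom_solution blocks → Spec_solution blocks (solution blocks)

-- ===== LEMMAS AND PROOFS =====

theorem altLeft_spec (blocks : List Int) (k : Nat) :
    altLeft blocks k = (List.range k).map (fun j => (solWhileL blocks j : Int)) := by
  induction k with
  | zero => simp [altLeft]
  | succ k ih =>
    rw [altLeft, List.range_succ, List.map_append, ih]
    congr 1
    simp only [List.map_cons, List.map_nil]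
    congr 1
    cases k with
    | zero => simp [solWhileL]
    | succ k' =>
      rw [solWhileL]
      simp only [Nat.succ_ne_zero, false_or]
      rw [show (((k' + 1 : Nat) : Int)) - 1 = ((k' : Nat) : Int) by push_cast; ring]
      rw [show (((k' + 1 : Nat) : Int)) = ((k' : Nat) : Int) + 1 by push_cast; ring]
      by_cases hc : PySem.List.pyGetD blocks ((k' : Nat) : Int) 0 <
          PySem.List.pyGetD blocks (((k' : Nat) : Int) + 1) 0
      · rw [if_pos hc, if_pos hc]
        push_cast; ring
      · rw [if_neg hc, if_neg hc, PySem.List.pyGetD_natCast]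
        simp [List.getD]

-- r-endpoint of the expansion started at i, as A's while loop computes it
def RI (blocks : List Int) (i : Int) : Int :=
  solWhileR blocks i (((blocks.length : Int) - 1 - i).toNat)

theorem RI_rec (blocks : List Int) (i : Int) (h : i < (blocks.length : Int)) :
    RI blocks i =
      if i = (blocks.length : Int) - 1 ∨
         PySem.List.pyGetD blocks (i + 1) 0 < PySem.List.pyGetD blocks (i - 1) 0
      then i else RI blocks (i + 1) := by
  by_cases hi : i = (blocks.length : Int) - 1
  · have h0 : (((blocks.length : Int) - 1 - i)).toNat = 0 := by omega
    rw [if_pos (Or.inl hi)]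
    unfold RI
    rw [h0]
    rfl
  · have hfuel : (((blocks.length : Int) - 1 - i)).toNat
        = (((blocks.length : Int) - 1 - (i + 1))).toNat + 1 := by omega
    unfold RI
    rw [hfuel]
    show (if PySem.List.pyGetD blocks (i + 1) 0 < PySem.List.pyGetD blocks (i - 1) 0 then i
          else solWhileR blocks (i + 1) (((blocks.length : Int) - 1 - (i + 1))).toNat) = _
    by_cases hc : PySem.List.pyGetD blocks (i + 1) 0 < PySem.List.pyGetD blocks (i - 1) 0
    · rw [if_pos hc, if_pos (Or.inr hc)]
    · rw [if_neg hc, if_neg (not_or.mpr ⟨hi, hc⟩)]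

theorem altRight_spec (blocks : List Int) (k : Nat) (hk : k ≤ blocks.length) :
    altRight blocks k =
      (List.range k).map (fun j : Nat =>
        RI blocks ((blocks.length : Int) - (k : Int) + (j : Int))) := by
  induction k with
  | zero => simp [altRight]
  | succ k ih =>
    have hk' : k ≤ blocks.length := Nat.le_of_succ_le hk
    have hkI : (k : Int) + 1 ≤ (blocks.length : Int) := by exact_mod_cast hk
    rw [altRight, ih hk', List.range_succ_eq_map, List.map_cons, List.map_map]
    congr 1
    · -- head
      rw [show (blocks.length : Int) - ((k + 1 : Nat) : Int) + ((0 : Nat) : Int)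
            = (blocks.length : Int) - ((k : Int) + 1) by push_cast; ring]
      rw [RI_rec blocks _ (by omega)]
      by_cases hC : (blocks.length : Int) - ((k : Int) + 1) = (blocks.length : Int) - 1 ∨
          PySem.List.pyGetD blocks ((blocks.length : Int) - ((k : Int) + 1) + 1) 0 <
          PySem.List.pyGetD blocks ((blocks.length : Int) - ((k : Int) + 1) - 1) 0
      · rw [if_pos hC, if_pos hC]
      · rw [if_neg hC, if_neg hC]
        have hkne : k ≠ 0 := by
          intro h0
          exact hC (Or.inl (by rw [h0]; push_cast; ring))
        obtain ⟨k'', rfl⟩ := Nat.exists_eq_succ_of_ne_zero hkne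
        rw [List.range_succ_eq_map, List.map_cons, PySem.List.pyGetD_zero_cons]
        congr 1
        push_cast; ring
    · apply List.map_congr_left
      intro j hj
      simp only [Function.comp]
      congr 1
      push_cast; ring

theorem solution_eq (blocks : List Int) : solution blocks = solution_alt blocks := by
  unfold solution solution_alt
  apply PySem.List.foldl_congr_mem
  intro acc i hi
  rw [PySem.List.mem_pyRange_one] at hi
  obtain ⟨h0, hn⟩ := hi
  simp only [h0, true_and]
  have hiN : ((i.toNat : Int)) = i := Int.toNat_of_nonneg h0
  by_cases hc : (i < (blocks.length : Int) - 1 ∧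
      PySem.List.pyGetD blocks (i + 1) 0 < PySem.List.pyGetD blocks i 0) ∨
      PySem.List.pyGetD blocks (i - 1) 0 < PySem.List.pyGetD blocks i 0
  · rw [if_pos hc, if_pos hc]
  · rw [if_neg hc, if_neg hc]
    have hr : PySem.List.pyGetD (altRight blocks blocks.length) i 0 =
        solWhileR blocks i (((blocks.length : Int) - 1 - i)).toNat := by
      rw [altRight_spec blocks blocks.length le_rfl]
      rw [PySem.List.pyGetD_eq_getElem _ 0 h0 (by simpa using hn)]
      simp only [List.getElem_map, List.getElem_range]
      show RI blocks _ = _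
      rw [show (blocks.length : Int) - (blocks.length : Int) + ((i.toNat : Nat) : Int) = i by
        rw [hiN]; ring]
      rfl
    have hl : PySem.List.pyGetD (altLeft blocks blocks.length) i 0 =
        ((solWhileL blocks i.toNat : Nat) : Int) := by
      rw [altLeft_spec]
      rw [PySem.List.pyGetD_eq_getElem _ 0 h0 (by simpa using hn)]
      simp [List.getElem_map, List.getElem_range]
    rw [hr, hl]

-- ===== VERDICT (by name: the statement is the Claim_ definition above) =====
theorem solution_spec : Claim_equal_solution := by
  intro blocks _
  unfold Spec_solution
  exact solution_eq blocks
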